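-- pv_equiv track=rewrite | github.com/GTArrow/ProjectEuler | PythonPractice/Smallest multiple.py | check
-- ===== SOURCE A (Python) =====
-- def check(b,n):
--     a=True
--     for i in range(1,n+1):
--         if b%i==0:
--             a=True
--         else:
--             a=False
--             break
--     return a
-- ===== SOURCE B (Python) =====
-- def _gcd(x, y):
--     while y:
--         x, y = y, x % y
--     return x
--
-- def check(b, n):
--     if b == 0:
--         return True  # every integer divides 0
--     L = 1
--     c = 1
--     while c <= n:
--         L = L * c // _gcd(L, c)  # L = lcm(1..c)
--         if b % L:
--             # L divides lcm(1..n), so b can no longer be divisible by it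
--             return False
--         c += 1
--     return True
-- ===== Notes on version B (the rewrite author's own statement) =====
-- stated objective: alternative
-- what changed: Instead of testing b % i for each divisor i, B maintains the running lcm of 1..c (via a hand-written Euclid gcd) and tests b against that single aggregate, returning False as soon as the lcm stops dividing b and short-circuiting b == 0.
import Mathlib
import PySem

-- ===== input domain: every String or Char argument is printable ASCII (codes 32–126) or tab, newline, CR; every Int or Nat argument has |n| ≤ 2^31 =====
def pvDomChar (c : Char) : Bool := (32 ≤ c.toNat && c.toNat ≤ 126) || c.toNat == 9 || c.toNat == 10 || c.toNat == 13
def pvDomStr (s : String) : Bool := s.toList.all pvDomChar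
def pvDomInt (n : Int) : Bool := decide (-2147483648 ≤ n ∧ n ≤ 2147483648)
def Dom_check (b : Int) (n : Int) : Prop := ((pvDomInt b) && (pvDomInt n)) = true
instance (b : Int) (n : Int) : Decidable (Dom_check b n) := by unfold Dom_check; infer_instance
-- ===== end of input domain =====

-- B tests b against a running lcm of 1..c (exiting once it stops dividing b) instead of testing each divisor i (objective: alternative).

-- ===== PORT A =====
-- the for-loop 'for i in range(1, n+1)' with its break: a=True until some i fails, then False and break
def checkLoop (b : Int) (i n : Int) : Bool :=
  if i < n + 1 then
    (if PySem.Int.mod b i == 0 then checkLoop b (i + 1) n else false)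
  else true
termination_by (n + 1 - i).toNat
decreasing_by omega

def check (b : Int) (n : Int) : Bool := checkLoop b 1 n

-- ===== PORT B =====
-- hand-written Euclid gcd from Source B (while y: x, y = y, x % y), with Python's %
def pygcd (x y : Int) : Int :=
  if h : y = 0 then x else pygcd y (PySem.Int.mod x y)
termination_by y.natAbs
decreasing_by
  rcases lt_or_gt_of_ne h with hy | hy
  · have h1 := (PySem.Int.mod_neg_bounds x hy).1
    have h2 := (PySem.Int.mod_neg_bounds x hy).2
    omega
  · have h1 := PySem.Int.mod_nonneg x hy
    have h2 := PySem.Int.mod_lt x hy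
    omega

-- the while-loop of Source B: L = lcm(1..c), early False once b % L ≠ 0
def altLoop (b L c n : Int) : Bool :=
  if c ≤ n then
    (if PySem.Int.mod b (PySem.Int.floordiv (L * c) (pygcd L c)) == 0 then
      altLoop b (PySem.Int.floordiv (L * c) (pygcd L c)) (c + 1) n
    else false)
  else true
termination_by (n + 1 - c).toNat
decreasing_by omega

def check_alt (b : Int) (n : Int) : Bool :=
  if b = 0 then true else altLoop b 1 1 n

-- ===== PRECONDITION & SPEC =====
def Spec_check (b : Int) (n : Int) (out : Bool) : Prop := out = check_alt b n
instance (b : Int) (n : Int) (out : Bool) : Decidable (Spec_check b n out) := by unfold Spec_check; infer_instance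

-- ===== CLAIM (what is proved, stated in full; the proofs are below) =====
def Claim_equal_check : Prop := ∀ (b : Int) (n : Int), Dom_check b n → Spec_check b n (check b n)

-- ===== LEMMAS AND PROOFS =====

-- proof helper: A's loop viewed as a recursion over the explicit list range(1, n+1)
def checkList (b : Int) : List Int → Bool
  | [] => true
  | i :: rest => if PySem.Int.mod b i == 0 then checkList b rest else false

theorem checkLoop_eq_list (b i n : Int) :
    checkLoop b i n = checkList b (PySem.List.pyRange i (n + 1) 1) := by
  rw [checkLoop]
  split_ifs with hlt hmod
  · rw [PySem.List.pyRange_one_cons hlt, checkList, if_pos hmod, checkLoop_eq_list b (i + 1) n]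
  · rw [PySem.List.pyRange_one_cons hlt, checkList, if_neg hmod]
  · rw [PySem.List.pyRange_one_eq_nil (by omega), checkList]
termination_by (n + 1 - i).toNat
decreasing_by omega

theorem checkList_zero (l : List Int) : checkList 0 l = true := by
  induction l with
  | nil => rfl
  | cons i rest ih =>
    rw [checkList, if_pos, ih]
    simp [(PySem.Int.mod_eq_zero_iff_dvd 0 i).mpr (dvd_zero i)]

theorem gcd_step (x y : Int) : Int.gcd y (x % y) = Int.gcd x y := by
  apply Nat.dvd_antisymm
  · apply Int.dvd_gcd
    · have hx : x = y * (x / y) + x % y := (Int.mul_ediv_add_emod x y).symm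
      calc (Int.gcd y (x % y) : Int) ∣ y * (x / y) + x % y :=
        dvd_add (Dvd.dvd.mul_right (Int.gcd_dvd_left _ _) _) (Int.gcd_dvd_right _ _)
      _ = x := hx.symm
    · exact Int.gcd_dvd_left _ _
  · apply Int.dvd_gcd
    · exact Int.gcd_dvd_right _ _
    · have hm : x % y = x - y * (x / y) := by have := Int.mul_ediv_add_emod x y; linarith
      rw [hm]
      exact dvd_sub (Int.gcd_dvd_left _ _) (Dvd.dvd.mul_right (Int.gcd_dvd_right _ _) _)

theorem pygcd_eq_gcd (x y : Int) (hx : 0 ≤ x) (hy : 0 ≤ y) : pygcd x y = Int.gcd x y := by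
  rw [pygcd]
  split_ifs with h
  · subst h
    simp [Int.gcd, Int.natAbs_of_nonneg hx]
  · have hy' : 0 < y := lt_of_le_of_ne hy (Ne.symm h)
    rw [PySem.Int.mod_eq_emod_of_pos hy',
      pygcd_eq_gcd y (x % y) hy (Int.emod_nonneg x (ne_of_gt hy'))]
    exact_mod_cast gcd_step x y
termination_by y.natAbs
decreasing_by
  have h1 := Int.emod_nonneg x (ne_of_gt hy')
  have h2 := Int.emod_lt_of_pos x hy'
  omega

theorem step_eq_lcm (a c : Int) (ha : 0 < a) (hc : 0 < c) :
    PySem.Int.floordiv (a * c) (pygcd a c) = Int.lcm a c := by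
  have hg : pygcd a c = Int.gcd a c := pygcd_eq_gcd a c ha.le hc.le
  have hgpos : 0 < (Int.gcd a c : Int) := by
    have : a ≠ 0 := ne_of_gt ha
    exact_mod_cast Nat.pos_of_ne_zero (fun hz => this (Int.eq_zero_of_gcd_eq_zero_left hz))
  have hmul : a * c = (Int.gcd a c : Int) * Int.lcm a c := by
    have h := Int.gcd_mul_lcm a c
    have h2 : ((Int.gcd a c : Nat) : Int) * ((Int.lcm a c : Nat) : Int)
        = ((a.natAbs : Nat) : Int) * ((c.natAbs : Nat) : Int) := by exact_mod_cast h
    rw [Int.natAbs_of_nonneg ha.le, Int.natAbs_of_nonneg hc.le] at h2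
    linarith
  rw [hg, PySem.Int.floordiv_eq_ediv_of_pos hgpos, hmul,
    Int.mul_ediv_cancel_left _ (ne_of_gt hgpos)]

theorem lcm_cast_pos (a c : Int) (ha : 0 < a) (hc : 0 < c) :
    0 < ((Int.lcm a c : Nat) : Int) := by
  have hne : Int.lcm a c ≠ 0 := by
    unfold Int.lcm
    exact Nat.lcm_ne_zero (Int.natAbs_ne_zero.mpr (ne_of_gt ha))
      (Int.natAbs_ne_zero.mpr (ne_of_gt hc))
  exact_mod_cast Nat.pos_of_ne_zero hne

theorem alt_eq (b n c L : Int) (hc : 0 < c) (hL : 0 < L) (hdvd : L ∣ b) :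
    altLoop b L c n = checkList b (PySem.List.pyRange c (n + 1) 1) := by
  rw [altLoop]
  split_ifs with hcn hmod
  · -- the new lcm still divides b, hence so does c; both loops continue
    rw [step_eq_lcm L c hL hc] at hmod ⊢
    have hdvd' : ((Int.lcm L c : Nat) : Int) ∣ b :=
      (PySem.Int.mod_eq_zero_iff_dvd b _).mp (by simpa using hmod)
    have hcd : c ∣ b := dvd_trans (Int.dvd_lcm_right L c) hdvd'
    rw [PySem.List.pyRange_one_cons (by omega), checkList,
      if_pos (by simp [(PySem.Int.mod_eq_zero_iff_dvd b c).mpr hcd])]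
    exact alt_eq b n (c + 1) _ (by omega) (lcm_cast_pos L c hL hc) hdvd'
  · -- the new lcm fails, so c cannot divide b (else lcm L c ∣ b); both loops stop with False
    rw [step_eq_lcm L c hL hc] at hmod
    have hncd : ¬ c ∣ b := fun hcd =>
      hmod (by simp [(PySem.Int.mod_eq_zero_iff_dvd b _).mpr (Int.coe_lcm_dvd hdvd hcd)])
    rw [PySem.List.pyRange_one_cons (by omega), checkList, if_neg
      (by simpa [PySem.Int.mod_eq_zero_iff_dvd] using hncd)]
  · rw [PySem.List.pyRange_one_eq_nil (by omega), checkList]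
termination_by (n + 1 - c).toNat
decreasing_by omega

-- ===== VERDICT (by name: the statement is the Claim_ definition above) =====
theorem check_spec : Claim_equal_check := by
  intro b n _
  unfold Spec_check check check_alt
  rw [checkLoop_eq_list]
  split_ifs with hb
  · subst hb
    exact checkList_zero _
  · exact (alt_eq b n 1 1 one_pos one_pos (one_dvd b)).symm
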